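-- pv_equiv track=rewrite | github.com/punoqun/1010- | ai.py | get_heuristic_score
-- ===== SOURCE A (Python) =====
-- def get_heuristic_score(field):
--     """
--     Calculate a heuristic score for the given field state.
--
--     Evaluates the field based on empty cells and their connectivity.
--
--     Args:
--         field (list): 2D grid representing the current game board
--
--     Returns:
--         int: Heuristic score value
--     """
--     score = 0
--     rows = len(field)
--     cols = len(field[0]) if rows > 0 else 0
--     neighbor_offsets = [
--         (-1, 0, 2),
--         (-1, -1, 4),
--         (-1, 1, 4),
--         (1, 0, 2),
--         (1, -1, 4),
--         (1, 1, 4),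
--         (0, -1, 2),
--         (0, 1, 2),
--     ]
--     for y in range(rows):
--         for x in range(cols):
--             if field[y][x] == 0:
--                 score += 1
--                 for dy, dx, bonus in neighbor_offsets:
--                     ny, nx = y + dy, x + dx
--                     if 0 <= ny < rows and 0 <= nx < cols and field[ny][nx] == 0:
--                         score += bonus
--     return score
-- ===== SOURCE B (Python) =====
-- def get_heuristic_score(field):
--     rows = len(field)
--     cols = len(field[0]) if rows > 0 else 0
--     # Stage 1: one masking pass -> 0/1 grid of empty cells (rows truncated to cols).
--     grid = [[1 if v == 0 else 0 for v in row[:cols]] for row in field]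
--     # Stage 2: whole-row / row-pair zip reductions; no per-cell neighbor offsets.
--     empties = sum(sum(r) for r in grid)
--     horiz = sum(a * b for r in grid for a, b in zip(r, r[1:]))
--     vert = sum(a * b for r1, r2 in zip(grid, grid[1:]) for a, b in zip(r1, r2))
--     diag = sum(a * b for r1, r2 in zip(grid, grid[1:])
--                for a, b in list(zip(r1, r2[1:])) + list(zip(r1[1:], r2)))
--     return empties + 4 * (horiz + vert) + 8 * diag
-- ===== Notes on version B (the rewrite author's own statement) =====
-- stated objective: alternative
-- what changed: B replaces A's per-cell scan over eight directional offsets with bounds checks by staged whole-structure passes: it first masks the field into a 0/1 grid of empty cells, then obtains the empty count and the horizontal/vertical/diagonal adjacency totals as zip-reductions over rows and adjacent row pairs (no coordinates, no bounds checks), combining them with weights 4 and 8.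
import Mathlib
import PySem

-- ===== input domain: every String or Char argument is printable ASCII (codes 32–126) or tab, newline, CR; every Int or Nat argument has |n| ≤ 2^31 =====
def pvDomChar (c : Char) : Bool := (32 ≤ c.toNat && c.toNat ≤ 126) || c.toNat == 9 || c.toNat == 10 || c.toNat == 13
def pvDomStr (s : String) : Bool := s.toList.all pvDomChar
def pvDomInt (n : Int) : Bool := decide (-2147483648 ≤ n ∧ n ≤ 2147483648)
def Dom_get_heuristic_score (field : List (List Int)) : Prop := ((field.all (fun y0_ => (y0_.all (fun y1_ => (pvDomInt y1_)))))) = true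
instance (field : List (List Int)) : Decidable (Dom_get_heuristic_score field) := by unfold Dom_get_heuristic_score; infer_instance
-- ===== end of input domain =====

-- B scores the board by staged whole-row passes: it masks the field into a 0/1 grid of empty
-- cells, then computes the empty count and the horizontal/vertical/diagonal adjacency totals as
-- zip-reductions over rows and adjacent row pairs, instead of A's per-cell 8-offset scan.

-- ===== PORT A =====
-- A's neighbor_offsets list, literally.
def pvOffsetsA : List (Int × Int × Int) :=
  [(-1, 0, 2), (-1, -1, 4), (-1, 1, 4), (1, 0, 2), (1, -1, 4), (1, 1, 4), (0, -1, 2), (0, 1, 2)]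

-- field[y][x]; inside Pre_ every access A makes is in range, so the default is never returned.
def pvCell (field : List (List Int)) (y x : Int) : Int :=
  PySem.List.pyGetD (PySem.List.pyGetD field y []) x 1

def get_heuristic_score (field : List (List Int)) : Int :=
  let rows : Int := field.length
  let cols : Int := if rows > 0 then ((PySem.List.pyGetD field 0 []).length : Int) else 0
  (PySem.List.pyRange 0 rows 1).foldl (fun score y =>
    (PySem.List.pyRange 0 cols 1).foldl (fun score x =>
      if pvCell field y x = 0 then
        pvOffsetsA.foldl (fun score off =>
          if 0 ≤ y + off.1 ∧ y + off.1 < rows ∧ 0 ≤ x + off.2.1 ∧ x + off.2.1 < cols ∧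
              pvCell field (y + off.1) (x + off.2.1) = 0 then
            score + off.2.2
          else score) (score + 1)
      else score) score) 0

-- ===== PORT B =====
-- [1 if v == 0 else 0 for v in row[:cols]]
def pvMask (cols : Int) (row : List Int) : List Int :=
  (PySem.List.slice row none (some cols)).map (fun v => if v = 0 then 1 else 0)

-- sum(a * b for a, b in zs)
def pvZipSum (zs : List (Int × Int)) : Int := (zs.map (fun q => q.1 * q.2)).sum

def get_heuristic_score_alt (field : List (List Int)) : Int :=
  let rows : Int := field.length
  let cols : Int := if rows > 0 then ((PySem.List.pyGetD field 0 []).length : Int) else 0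
  let grid : List (List Int) := field.map (pvMask cols)
  let empties : Int := (grid.map List.sum).sum
  let horiz : Int := (grid.map (fun r => pvZipSum (r.zip r.tail))).sum
  let vert : Int := ((grid.zip grid.tail).map (fun p => pvZipSum (p.1.zip p.2))).sum
  let diag : Int := ((grid.zip grid.tail).map
      (fun p => pvZipSum (p.1.zip p.2.tail ++ p.1.tail.zip p.2))).sum
  empties + 4 * (horiz + vert) + 8 * diag

-- ===== PRECONDITION & SPEC =====
-- Pre_ excludes exactly the ragged grids on which A raises IndexError: some row shorter than row 0.
def Pre_get_heuristic_score (field : List (List Int)) : Prop :=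
  ∀ row ∈ field, (field.getD 0 []).length ≤ row.length
instance (field : List (List Int)) : Decidable (Pre_get_heuristic_score field) := by
  unfold Pre_get_heuristic_score; infer_instance

def pvWitness_get_heuristic_score : List (List Int) := [[0, 1], [1, 0]]

def Spec_get_heuristic_score (field : List (List Int)) (out : Int) : Prop :=
  out = get_heuristic_score_alt field
instance (field : List (List Int)) (out : Int) : Decidable (Spec_get_heuristic_score field out) := by
  unfold Spec_get_heuristic_score; infer_instance

-- ===== CLAIM (what is proved, stated in full; the proofs are below) =====
def Claim_equal_get_heuristic_score : Prop := ∀ (field : List (List Int)), Dom_get_heuristic_score field → Pre_get_heuristic_score field → Spec_get_heuristic_score field (get_heuristic_score field)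

-- ===== LEMMAS AND PROOFS =====

-- number of columns both programs use (Int form, and the same as a Nat)
def pvCols (field : List (List Int)) : Int :=
  if (field.length : Int) > 0 then ((PySem.List.pyGetD field 0 []).length : Int) else 0

def pvColsN (field : List (List Int)) : Nat :=
  if 0 < field.length then (PySem.List.pyGetD field 0 []).length else 0

lemma pvCols_natCast (field : List (List Int)) : pvCols field = ((pvColsN field : Nat) : Int) := by
  unfold pvCols pvColsN
  by_cases h : 0 < field.length
  · rw [if_pos (by exact_mod_cast h), if_pos h]
  · rw [if_neg (fun hc => h (by exact_mod_cast hc)), if_neg h]; simp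

-- An empty cell of the grid, as a predicate on integer coordinates (false outside the grid).
abbrev pvE (field : List (List Int)) (cols : Int) (c : Int × Int) : Prop :=
  0 ≤ c.1 ∧ c.1 < (field.length : Int) ∧ 0 ≤ c.2 ∧ c.2 < cols ∧ pvCell field c.1 c.2 = 0

def pve (field : List (List Int)) (cols : Int) (c : Int × Int) : Int :=
  if pvE field cols c then 1 else 0

def pvGridList (field : List (List Int)) (cols : Int) : List (Int × Int) :=
  (PySem.List.pyRange 0 (field.length : Int) 1).flatMap (fun y =>
    (PySem.List.pyRange 0 cols 1).map (fun x => (y, x)))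

-- edge-count sums over the grid, and the empty-cell count
def pvSL (field : List (List Int)) (cols : Int) (d : Int × Int) : Int :=
  ((pvGridList field cols).map
    (fun c => pve field cols c * pve field cols (c.1 + d.1, c.2 + d.2))).sum

def pvNL (field : List (List Int)) (cols : Int) : Int :=
  ((pvGridList field cols).map (pve field cols)).sum

lemma mem_pvGridList (field : List (List Int)) (cols : Int) (c : Int × Int) :
    c ∈ pvGridList field cols ↔
      0 ≤ c.1 ∧ c.1 < (field.length : Int) ∧ 0 ≤ c.2 ∧ c.2 < cols := by
  obtain ⟨a, b⟩ := c
  unfold pvGridList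
  simp [List.mem_flatMap, PySem.List.mem_pyRange_one]
  tauto

lemma nodup_pvGridList (field : List (List Int)) (cols : Int) :
    (pvGridList field cols).Nodup := by
  unfold pvGridList
  rw [List.nodup_flatMap]
  refine ⟨fun y _ => (PySem.List.nodup_pyRange_one 0 cols).map
    (fun a b h => by simpa using h), ?_⟩
  refine (PySem.List.nodup_pyRange_one 0 (field.length : Int)).imp ?_
  intro a b hab p hp hq
  rcases List.mem_map.1 hp with ⟨x, _, rfl⟩
  rcases List.mem_map.1 hq with ⟨x', _, h2⟩
  exact hab (congrArg Prod.fst h2).symm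

lemma pve_eq_zero (field : List (List Int)) (cols : Int) (c : Int × Int)
    (h : c ∉ pvGridList field cols) : pve field cols c = 0 := by
  unfold pve
  rw [if_neg]
  intro hE
  exact h ((mem_pvGridList field cols c).2 ⟨hE.1, hE.2.1, hE.2.2.1, hE.2.2.2.1⟩)

lemma pvSL_symm (field : List (List Int)) (cols : Int) (d : Int × Int) :
    pvSL field cols d = pvSL field cols (-d.1, -d.2) := by
  have hnd := nodup_pvGridList field cols
  unfold pvSL
  rw [← List.sum_toFinset _ hnd, ← List.sum_toFinset _ hnd]
  have he0 : ∀ c : Int × Int, c ∉ (pvGridList field cols).toFinset → pve field cols c = 0 :=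
    fun c hc => pve_eq_zero _ _ _ (fun h => hc (List.mem_toFinset.2 h))
  have step : ∀ (u v : Int),
      ∑ c ∈ (pvGridList field cols).toFinset, pve field cols c * pve field cols (c.1 + u, c.2 + v)
        = ∑ c ∈ (pvGridList field cols).toFinset.filter
            (fun c => (c.1 + u, c.2 + v) ∈ (pvGridList field cols).toFinset),
            pve field cols c * pve field cols (c.1 + u, c.2 + v) := by
    intro u v
    rw [Finset.sum_filter_of_ne]
    intro c _ hne
    by_contra hmem
    exact hne (by rw [he0 _ hmem, mul_zero])
  rw [step, step]
  refine Finset.sum_nbij' (i := fun c => (c.1 + d.1, c.2 + d.2))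
    (j := fun c => (c.1 + -d.1, c.2 + -d.2)) ?_ ?_ ?_ ?_ ?_
  · intro a ha
    rw [Finset.mem_filter] at ha ⊢
    refine ⟨ha.2, ?_⟩
    have : (a.1 + d.1 + -d.1, a.2 + d.2 + -d.2) = a := by
      obtain ⟨a1, a2⟩ := a; simp
    rw [this]; exact ha.1
  · intro b hb
    rw [Finset.mem_filter] at hb ⊢
    refine ⟨hb.2, ?_⟩
    have : (b.1 + -d.1 + d.1, b.2 + -d.2 + d.2) = b := by
      obtain ⟨b1, b2⟩ := b; simp
    rw [this]; exact hb.1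
  · intro a _
    obtain ⟨a1, a2⟩ := a; simp
  · intro b _
    obtain ⟨b1, b2⟩ := b; simp
  · intro a _
    have h1 : (a.1 + d.1 + -d.1, a.2 + d.2 + -d.2) = a := by
      obtain ⟨a1, a2⟩ := a; simp
    simp only [h1]
    exact mul_comm _ _

-- a foldl that conditionally adds is a sum
lemma foldl_ite_add {a : Type} (l : List a) (P : a -> Prop) [DecidablePred P]
    (w : a -> Int) (init : Int) :
    l.foldl (fun s x => if P x then s + w x else s) init
      = init + (l.map (fun x => if P x then w x else 0)).sum := by
  have hf : (fun (s : Int) x => if P x then s + w x else s)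
      = fun s x => s + (if P x then w x else 0) := by
    funext s x; split <;> simp
  rw [hf, PySem.List.foldl_add]

-- the per-cell 8-direction bonus of A, as a sum
def pvInner8 (field : List (List Int)) (cols : Int) (y x : Int) : Int :=
  (pvOffsetsA.map (fun off => off.2.2 * pve field cols (y + off.1, x + off.2.1))).sum

lemma sum_flatMap_int {a : Type} (l : List a) (f : a -> List Int) :
    (l.flatMap f).sum = (l.map fun y => (f y).sum).sum := by
  induction l with
  | nil => rfl
  | cons h t ih => simp [List.flatMap_cons, ih]

lemma levelA1 (field : List (List Int)) (cols : Int) (y x s : Int) :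
    pvOffsetsA.foldl (fun score off =>
      if 0 ≤ y + off.1 ∧ y + off.1 < (field.length : Int) ∧ 0 ≤ x + off.2.1 ∧ x + off.2.1 < cols ∧
          pvCell field (y + off.1) (x + off.2.1) = 0 then
        score + off.2.2
      else score) (s + 1)
      = s + (1 + pvInner8 field cols y x) := by
  rw [foldl_ite_add]
  unfold pvInner8
  rw [List.map_congr_left (g := fun off => off.2.2 * pve field cols (y + off.1, x + off.2.1))]
  · ring
  · intro off _
    unfold pve pvE
    simp only []
    split_ifs <;> ring

lemma levelA2 (field : List (List Int)) (cols : Int) (y s : Int) :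
    (PySem.List.pyRange 0 cols 1).foldl (fun score x =>
      if pvCell field y x = 0 then
        pvOffsetsA.foldl (fun score off =>
          if 0 ≤ y + off.1 ∧ y + off.1 < (field.length : Int) ∧ 0 ≤ x + off.2.1 ∧ x + off.2.1 < cols ∧
              pvCell field (y + off.1) (x + off.2.1) = 0 then
            score + off.2.2
          else score) (score + 1)
      else score) s
      = s + ((PySem.List.pyRange 0 cols 1).map
          (fun x => if pvCell field y x = 0 then 1 + pvInner8 field cols y x else 0)).sum := by
  rw [PySem.List.foldl_congr_mem'
    (g := fun score x => if pvCell field y x = 0 then score + (1 + pvInner8 field cols y x) else score)]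
  · rw [foldl_ite_add]
  · intro x _ score
    by_cases h : pvCell field y x = 0
    · rw [if_pos h, if_pos h, levelA1]
    · rw [if_neg h, if_neg h]

lemma sum_map_weighted (field : List (List Int)) (cols : Int)
    (offs : List (Int × Int × Int)) (w : Int × Int × Int → Int) :
    ((pvGridList field cols).map (fun c => pve field cols c *
        ((offs.map (fun off => w off * pve field cols (c.1 + off.1, c.2 + off.2.1))).sum))).sum
      = (offs.map (fun off => w off * pvSL field cols (off.1, off.2.1))).sum := by
  induction offs with
  | nil => simp
  | cons o t ih =>
    simp only [List.map_cons, List.sum_cons]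
    rw [show (fun c : Int × Int => pve field cols c *
          (w o * pve field cols (c.1 + o.1, c.2 + o.2.1)
            + (t.map (fun off => w off * pve field cols (c.1 + off.1, c.2 + off.2.1))).sum))
        = fun c : Int × Int => (w o * (pve field cols c * pve field cols (c.1 + o.1, c.2 + o.2.1)))
            + pve field cols c *
              (t.map (fun off => w off * pve field cols (c.1 + off.1, c.2 + off.2.1))).sum from
      funext fun c => by ring]
    rw [PySem.List.sum_map_add_int, ih, List.sum_map_mul_left]
    rfl

lemma pvGrid_sum (field : List (List Int)) (cols : Int) (t : Int × Int → Int) :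
    ((pvGridList field cols).map t).sum
      = ((PySem.List.pyRange 0 (field.length : Int) 1).map (fun y =>
          ((PySem.List.pyRange 0 cols 1).map (fun x => t (y, x))).sum)).sum := by
  unfold pvGridList
  rw [List.map_flatMap, sum_flatMap_int]
  simp only [List.map_map]
  rfl

lemma A_eq (field : List (List Int)) :
    get_heuristic_score field
      = pvNL field (pvCols field)
        + (2 * pvSL field (pvCols field) (-1, 0) + 4 * pvSL field (pvCols field) (-1, -1)
           + 4 * pvSL field (pvCols field) (-1, 1) + 2 * pvSL field (pvCols field) (1, 0)
           + 4 * pvSL field (pvCols field) (1, -1) + 4 * pvSL field (pvCols field) (1, 1)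
           + 2 * pvSL field (pvCols field) (0, -1) + 2 * pvSL field (pvCols field) (0, 1)) := by
  have h0 : get_heuristic_score field
      = (PySem.List.pyRange 0 (field.length : Int) 1).foldl (fun score y =>
          (PySem.List.pyRange 0 (pvCols field) 1).foldl (fun score x =>
            if pvCell field y x = 0 then
              pvOffsetsA.foldl (fun score off =>
                if 0 ≤ y + off.1 ∧ y + off.1 < (field.length : Int) ∧ 0 ≤ x + off.2.1 ∧
                    x + off.2.1 < pvCols field ∧ pvCell field (y + off.1) (x + off.2.1) = 0 then
                  score + off.2.2
                else score) (score + 1)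
            else score) score) 0 := rfl
  rw [h0]
  rw [PySem.List.foldl_congr_mem'
    (g := fun score y => score + ((PySem.List.pyRange 0 (pvCols field) 1).map
      (fun x => if pvCell field y x = 0 then 1 + pvInner8 field (pvCols field) y x else 0)).sum)
    _ _ _ (fun y _ score => levelA2 field (pvCols field) y score)]
  rw [PySem.List.foldl_add, zero_add]
  rw [show (fun y => ((PySem.List.pyRange 0 (pvCols field) 1).map
        (fun x => if pvCell field y x = 0 then 1 + pvInner8 field (pvCols field) y x else 0)).sum)
      = fun y => ((PySem.List.pyRange 0 (pvCols field) 1).map (fun x =>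
          (fun c : Int × Int => if pvCell field c.1 c.2 = 0 then
            1 + pvInner8 field (pvCols field) c.1 c.2 else 0) (y, x))).sum from rfl]
  rw [← pvGrid_sum field (pvCols field)
    (fun c : Int × Int => if pvCell field c.1 c.2 = 0 then 1 + pvInner8 field (pvCols field) c.1 c.2 else 0)]
  rw [List.map_congr_left (g := fun c : Int × Int =>
    pve field (pvCols field) c
      + pve field (pvCols field) c * pvInner8 field (pvCols field) c.1 c.2)]
  · rw [PySem.List.sum_map_add_int]
    unfold pvInner8
    rw [show (fun c : Int × Int => pve field (pvCols field) c
          * (pvOffsetsA.map (fun off => off.2.2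
              * pve field (pvCols field) (c.1 + off.1, c.2 + off.2.1))).sum)
        = fun c : Int × Int => pve field (pvCols field) c
            * (pvOffsetsA.map (fun off => (fun o : Int × Int × Int => o.2.2) off
                * pve field (pvCols field) (c.1 + off.1, c.2 + off.2.1))).sum from rfl]
    rw [sum_map_weighted field (pvCols field) pvOffsetsA (fun o => o.2.2)]
    unfold pvOffsetsA pvNL
    simp only [List.map_cons, List.map_nil, List.sum_cons, List.sum_nil]
    ring
  · intro c hc
    have hm := (mem_pvGridList field (pvCols field) c).1 hc
    unfold pve pvE
    by_cases h : pvCell field c.1 c.2 = 0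
    · rw [if_pos h, if_pos ⟨hm.1, hm.2.1, hm.2.2.1, hm.2.2.2, h⟩]; ring
    · rw [if_neg h, if_neg (fun hE => h hE.2.2.2.2)]; ring

-- ============ B-side lemmas: zip reductions as indexed sums ============

-- the 0/1 grid value at Nat coordinates (0 outside the masked grid)
def pvG (field : List (List Int)) (y x : Nat) : Int :=
  ((field.map (pvMask (pvCols field))).getD y []).getD x 0

def pvS2 (R C : Nat) (f : Nat → Nat → Int) : Int :=
  ((List.range R).map (fun y => ((List.range C).map (f y)).sum)).sum

lemma pv_sum_map_getD {α : Type} (l : List α) (F : α → Int) (d : α) :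
    (l.map F).sum = ((List.range l.length).map (fun y => F (l.getD y d))).sum := by
  induction l with
  | nil => rfl
  | cons a t ih =>
    simp only [List.map_cons, List.sum_cons, List.length_cons, List.range_succ_eq_map,
      List.map_map, Function.comp_def, List.getD_cons_zero, List.getD_cons_succ]
    rw [ih]

lemma pv_getD_tail (l : List Int) (i : Nat) : l.tail.getD i 0 = l.getD (i + 1) 0 := by
  cases l <;> simp [List.getD]

lemma pv_zipSum_eq (a b : List Int) (N : Nat) (h : min a.length b.length ≤ N) :
    pvZipSum (a.zip b) = ((List.range N).map (fun i => a.getD i 0 * b.getD i 0)).sum := by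
  induction a generalizing b N with
  | nil => simp [pvZipSum, List.getD]
  | cons x xs ih =>
    cases b with
    | nil => simp [pvZipSum, List.getD]
    | cons y ys =>
      cases N with
      | zero => simp only [List.length_cons] at h; omega
      | succ M =>
        have hm : min xs.length ys.length ≤ M := by
          simp only [List.length_cons] at h; omega
        simp only [List.zip_cons_cons, pvZipSum, List.map_cons, List.sum_cons,
          List.range_succ_eq_map, List.map_map, Function.comp_def, List.getD_cons_zero,
          List.getD_cons_succ]
        rw [show ((xs.zip ys).map (fun q => q.1 * q.2)).sum = pvZipSum (xs.zip ys) from rfl,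
          ih ys M hm]

lemma pv_zipTail_sum {α : Type} (l : List α) (d : α) (F : α → α → Int) (h0 : ∀ r, F r d = 0) :
    ((l.zip l.tail).map (fun p => F p.1 p.2)).sum
      = ((List.range l.length).map (fun y => F (l.getD y d) (l.getD (y + 1) d))).sum := by
  induction l with
  | nil => rfl
  | cons a t ih =>
    cases t with
    | nil => simp [List.range_one, List.getD, h0]
    | cons b s =>
      have ih' := ih
      simp only [List.tail_cons] at ih'
      simp only [List.tail_cons, List.zip_cons_cons, List.map_cons, List.sum_cons]
      rw [ih']
      simp only [List.length_cons, List.range_succ_eq_map, List.map_cons, List.sum_cons,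
        List.map_map, Function.comp_def, List.getD_cons_zero, List.getD_cons_succ,
        Nat.succ_eq_add_one]

lemma pv_sum_range_extend (m N : Nat) (h : m ≤ N) (f : Nat → Int)
    (hf : ∀ i, m ≤ i → f i = 0) :
    ((List.range m).map f).sum = ((List.range N).map f).sum := by
  have hN : N = m + (N - m) := by omega
  rw [hN, List.range_add, List.map_append, List.sum_append]
  have : ((List.range (N - m)).map (fun k => f (m + k))).sum = 0 := by
    rw [List.map_congr_left (g := fun _ => (0 : Int)) (fun k _ => hf (m + k) (by omega))]
    simp
  simp only [List.map_map, Function.comp_def]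
  rw [this, add_zero]

lemma pv_sum_range_shift (C : Nat) (f g : Nat → Int) (h0 : f 0 = 0)
    (hfg : ∀ x, f (x + 1) = g x) (hlast : ∀ k, k + 1 = C → g k = 0) :
    ((List.range C).map f).sum = ((List.range C).map g).sum := by
  cases C with
  | zero => rfl
  | succ M =>
    have hL : ((List.range (M + 1)).map f).sum = ((List.range M).map g).sum := by
      rw [List.range_succ_eq_map]
      simp only [List.map_cons, List.sum_cons, List.map_map, Function.comp_def, h0, zero_add]
      exact congrArg List.sum (List.map_congr_left (fun x _ => hfg x))
    have hR : ((List.range (M + 1)).map g).sum = ((List.range M).map g).sum + g M := by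
      rw [List.range_succ]; simp
    rw [hL, hR, hlast M rfl, add_zero]

lemma pv_pyRange_nat_sum (n : Nat) (f : Int → Int) :
    ((PySem.List.pyRange 0 (n : Int) 1).map f).sum
      = ((List.range n).map (fun k : Nat => f (k : Int))).sum := by
  rw [PySem.List.pyRange_one]
  simp only [sub_zero, Int.toNat_natCast, List.map_map, Function.comp_def, zero_add]

lemma pvSL_nat (field : List (List Int)) (C : Nat) (d : Int × Int) :
    pvSL field (C : Int) d
      = pvS2 field.length C (fun y x =>
          pve field (C : Int) ((y : Int), (x : Int))
            * pve field (C : Int) ((y : Int) + d.1, (x : Int) + d.2)) := by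
  unfold pvSL pvS2
  rw [pvGrid_sum, pv_pyRange_nat_sum]
  refine congrArg List.sum (List.map_congr_left ?_)
  intro y _
  rw [pv_pyRange_nat_sum]

lemma pvNL_nat (field : List (List Int)) (C : Nat) :
    pvNL field (C : Int)
      = pvS2 field.length C (fun y x => pve field (C : Int) ((y : Int), (x : Int))) := by
  unfold pvNL pvS2
  rw [pvGrid_sum, pv_pyRange_nat_sum]
  refine congrArg List.sum (List.map_congr_left ?_)
  intro y _
  rw [pv_pyRange_nat_sum]

-- ============ grid facts ============

lemma pvMask_length_le (C : Nat) (row : List Int) : (pvMask (C : Int) row).length ≤ C := by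
  unfold pvMask
  rw [PySem.List.slice_to_natCast]
  simp

lemma pvMask_nil (C : Nat) : pvMask (C : Int) [] = [] := by
  unfold pvMask
  rw [PySem.List.slice_to_natCast]
  simp

lemma pv_getD_map_mask (field : List (List Int)) (C : Nat) (y : Nat) :
    (field.map (pvMask (C : Int))).getD y [] = pvMask (C : Int) (field.getD y []) := by
  by_cases h : y < field.length
  · rw [List.getD_eq_getElem _ _ (by simpa using h), List.getD_eq_getElem _ _ h,
      List.getElem_map]
  · rw [List.getD_eq_default _ _ (by simp; omega), List.getD_eq_default _ _ (by omega),
      pvMask_nil]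

lemma pv_mask_getD (C : Nat) (row : List Int) (x : Nat) (hx : x < C) (hC : C ≤ row.length) :
    (pvMask (C : Int) row).getD x 0 = (if row.getD x 1 = 0 then (1 : Int) else 0) := by
  unfold pvMask
  rw [PySem.List.slice_to_natCast]
  have hxr : x < row.length := by omega
  simp [List.getD_eq_getElem?_getD, List.getElem?_map, hx, List.getElem?_eq_getElem hxr]

lemma pvG_eq_pve (field : List (List Int)) (hPre : Pre_get_heuristic_score field) (y x : Nat) :
    pve field (pvCols field) ((y : Int), (x : Int)) = pvG field y x := by
  unfold pvG
  rw [pvCols_natCast, pv_getD_map_mask]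
  by_cases hy : y < field.length
  · have hrow : field.getD y [] ∈ field := by
      rw [List.getD_eq_getElem field [] hy]
      exact List.getElem_mem hy
    have hCle : pvColsN field ≤ (field.getD y []).length := by
      have hp := hPre _ hrow
      unfold pvColsN
      rw [if_pos (by omega), PySem.List.pyGetD_zero]
      exact hp
    by_cases hx : x < pvColsN field
    · rw [pv_mask_getD (pvColsN field) _ x hx hCle]
      unfold pve pvE pvCell
      simp only [PySem.List.pyGetD_natCast]
      by_cases hz : (field.getD y []).getD x 1 = 0
      · rw [if_pos hz, if_pos]
        refine ⟨?_, ?_, ?_, ?_, hz⟩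
        · show (0 : Int) ≤ ((y : Nat) : Int); positivity
        · show ((y : Nat) : Int) < ((field.length : Nat) : Int); exact_mod_cast hy
        · show (0 : Int) ≤ ((x : Nat) : Int); positivity
        · show ((x : Nat) : Int) < ((pvColsN field : Nat) : Int); exact_mod_cast hx
      · rw [if_neg hz, if_neg (fun hE => hz hE.2.2.2.2)]
    · rw [List.getD_eq_default _ _ (show (pvMask ((pvColsN field : Nat) : Int)
          (field.getD y [])).length ≤ x from by
        have := pvMask_length_le (pvColsN field) (field.getD y [])
        omega)]
      have hne : ¬ pvE field ((pvColsN field : Nat) : Int) (((y : Nat) : Int), ((x : Nat) : Int)) := by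
        intro hE
        have h2 : ((x : Nat) : Int) < ((pvColsN field : Nat) : Int) := hE.2.2.2.1
        omega
      unfold pve
      rw [if_neg hne]
  · rw [List.getD_eq_default field [] (show field.length ≤ y from by omega), pvMask_nil]
    have hne : ¬ pvE field ((pvColsN field : Nat) : Int) (((y : Nat) : Int), ((x : Nat) : Int)) := by
      intro hE
      have h2 : ((y : Nat) : Int) < ((field.length : Nat) : Int) := hE.2.1
      omega
    unfold pve
    rw [if_neg hne]
    simp

lemma pve_neg_x (field : List (List Int)) (cols : Int) (y x : Int) (hx : x < 0) :
    pve field cols (y, x) = 0 := by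
  unfold pve pvE
  rw [if_neg]
  intro hE
  have := hE.2.2.1
  omega

lemma pvG_col_zero (field : List (List Int)) (y x : Nat) (hx : pvColsN field ≤ x) :
    pvG field y x = 0 := by
  unfold pvG
  rw [pvCols_natCast, pv_getD_map_mask]
  rw [List.getD_eq_default _ _ (by have := pvMask_length_le (pvColsN field) (field.getD y []); omega)]

-- ============ B in indexed-sum form ============

lemma pv_zipSum_append (u v : List (Int × Int)) : pvZipSum (u ++ v) = pvZipSum u + pvZipSum v := by
  simp [pvZipSum]

lemma B_eq (field : List (List Int)) :
    get_heuristic_score_alt field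
      = pvS2 field.length (pvColsN field) (fun y x => pvG field y x)
        + 4 * (pvS2 field.length (pvColsN field) (fun y x => pvG field y x * pvG field y (x + 1))
             + pvS2 field.length (pvColsN field) (fun y x => pvG field y x * pvG field (y + 1) x))
        + 8 * (pvS2 field.length (pvColsN field) (fun y x => pvG field y x * pvG field (y + 1) (x + 1))
             + pvS2 field.length (pvColsN field) (fun y x => pvG field y (x + 1) * pvG field (y + 1) x)) := by
  have hGlen : ∀ y : Nat, ((field.map (pvMask (pvCols field))).getD y []).length ≤ pvColsN field := by
    intro y
    rw [pvCols_natCast, pv_getD_map_mask]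
    exact pvMask_length_le _ _
  set grid := field.map (pvMask (pvCols field)) with hgrid
  have hglen : grid.length = field.length := by rw [hgrid]; simp
  have h0 : get_heuristic_score_alt field
      = (grid.map List.sum).sum
        + 4 * ((grid.map (fun r => pvZipSum (r.zip r.tail))).sum
             + ((grid.zip grid.tail).map (fun p => pvZipSum (p.1.zip p.2))).sum)
        + 8 * ((grid.zip grid.tail).map
            (fun p => pvZipSum (p.1.zip p.2.tail ++ p.1.tail.zip p.2))).sum := rfl
  rw [h0]
  have hemp : (grid.map List.sum).sum
      = pvS2 field.length (pvColsN field) (fun y x => pvG field y x) := by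
    rw [pv_sum_map_getD grid List.sum [], hglen]
    unfold pvS2
    refine congrArg List.sum (List.map_congr_left (fun y _ => ?_))
    have h1 : (grid.getD y []).sum
        = ((List.range (grid.getD y []).length).map (fun x => (grid.getD y []).getD x 0)).sum := by
      have := pv_sum_map_getD (grid.getD y []) id 0
      simpa using this
    rw [h1, pv_sum_range_extend _ (pvColsN field) (hGlen y) _
      (fun i hi => List.getD_eq_default _ _ hi)]
    exact congrArg List.sum (List.map_congr_left (fun x _ => rfl))
  have hhor : (grid.map (fun r => pvZipSum (r.zip r.tail))).sum
      = pvS2 field.length (pvColsN field) (fun y x => pvG field y x * pvG field y (x + 1)) := by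
    rw [pv_sum_map_getD grid (fun r => pvZipSum (r.zip r.tail)) [], hglen]
    unfold pvS2
    refine congrArg List.sum (List.map_congr_left (fun y _ => ?_))
    rw [pv_zipSum_eq _ _ (pvColsN field) (by
      have := hGlen y; simp only [List.length_tail]; omega)]
    refine congrArg List.sum (List.map_congr_left (fun x _ => ?_))
    rw [pv_getD_tail]
    rfl
  have hver : ((grid.zip grid.tail).map (fun p => pvZipSum (p.1.zip p.2))).sum
      = pvS2 field.length (pvColsN field) (fun y x => pvG field y x * pvG field (y + 1) x) := by
    rw [pv_zipTail_sum grid [] (fun r r' => pvZipSum (r.zip r'))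
      (fun r => by simp [pvZipSum]), hglen]
    unfold pvS2
    refine congrArg List.sum (List.map_congr_left (fun y _ => ?_))
    rw [pv_zipSum_eq _ _ (pvColsN field) (by have := hGlen y; omega)]
    exact congrArg List.sum (List.map_congr_left (fun x _ => rfl))
  have hdia : ((grid.zip grid.tail).map
        (fun p => pvZipSum (p.1.zip p.2.tail ++ p.1.tail.zip p.2))).sum
      = pvS2 field.length (pvColsN field) (fun y x => pvG field y x * pvG field (y + 1) (x + 1))
        + pvS2 field.length (pvColsN field) (fun y x => pvG field y (x + 1) * pvG field (y + 1) x) := by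
    rw [pv_zipTail_sum grid [] (fun r r' => pvZipSum (r.zip r'.tail ++ r.tail.zip r'))
      (fun r => by simp [pvZipSum]), hglen]
    unfold pvS2
    rw [← PySem.List.sum_map_add_int]
    refine congrArg List.sum (List.map_congr_left (fun y _ => ?_))
    rw [pv_zipSum_append]
    congr 1
    · rw [pv_zipSum_eq _ _ (pvColsN field) (by have := hGlen y; omega)]
      refine congrArg List.sum (List.map_congr_left (fun x _ => ?_))
      rw [pv_getD_tail]
      rfl
    · rw [pv_zipSum_eq _ _ (pvColsN field) (by have := hGlen (y + 1); omega)]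
      refine congrArg List.sum (List.map_congr_left (fun x _ => ?_))
      rw [pv_getD_tail]
      rfl
  rw [hemp, hhor, hver, hdia]

-- ============ A in the same indexed-sum form, under Pre_ ============

lemma SL01 (field : List (List Int)) (hPre : Pre_get_heuristic_score field) :
    pvSL field (pvCols field) (0, 1)
      = pvS2 field.length (pvColsN field) (fun y x => pvG field y x * pvG field y (x + 1)) := by
  rw [pvCols_natCast, pvSL_nat]
  unfold pvS2
  refine congrArg List.sum (List.map_congr_left ?_)
  intro y _
  refine congrArg List.sum (List.map_congr_left ?_)
  intro x _
  show pve field ((pvColsN field : Nat) : Int) (((y : Nat) : Int), ((x : Nat) : Int))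
      * pve field ((pvColsN field : Nat) : Int) (((y : Nat) : Int) + 0, ((x : Nat) : Int) + 1)
    = pvG field y x * pvG field y (x + 1)
  congr 1
  · rw [← pvCols_natCast]; exact pvG_eq_pve field hPre y x
  · rw [show (((y : Nat) : Int) + 0, ((x : Nat) : Int) + 1)
        = (((y : Nat) : Int), (((x + 1 : Nat)) : Int)) from by push_cast; simp]
    rw [← pvCols_natCast]; exact pvG_eq_pve field hPre y (x + 1)

lemma SL10 (field : List (List Int)) (hPre : Pre_get_heuristic_score field) :
    pvSL field (pvCols field) (1, 0)
      = pvS2 field.length (pvColsN field) (fun y x => pvG field y x * pvG field (y + 1) x) := by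
  rw [pvCols_natCast, pvSL_nat]
  unfold pvS2
  refine congrArg List.sum (List.map_congr_left ?_)
  intro y _
  refine congrArg List.sum (List.map_congr_left ?_)
  intro x _
  show pve field ((pvColsN field : Nat) : Int) (((y : Nat) : Int), ((x : Nat) : Int))
      * pve field ((pvColsN field : Nat) : Int) (((y : Nat) : Int) + 1, ((x : Nat) : Int) + 0)
    = pvG field y x * pvG field (y + 1) x
  congr 1
  · rw [← pvCols_natCast]; exact pvG_eq_pve field hPre y x
  · rw [show (((y : Nat) : Int) + 1, ((x : Nat) : Int) + 0)
        = ((((y + 1 : Nat)) : Int), ((x : Nat) : Int)) from by push_cast; simp]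
    rw [← pvCols_natCast]; exact pvG_eq_pve field hPre (y + 1) x

lemma SL11 (field : List (List Int)) (hPre : Pre_get_heuristic_score field) :
    pvSL field (pvCols field) (1, 1)
      = pvS2 field.length (pvColsN field) (fun y x => pvG field y x * pvG field (y + 1) (x + 1)) := by
  rw [pvCols_natCast, pvSL_nat]
  unfold pvS2
  refine congrArg List.sum (List.map_congr_left ?_)
  intro y _
  refine congrArg List.sum (List.map_congr_left ?_)
  intro x _
  show pve field ((pvColsN field : Nat) : Int) (((y : Nat) : Int), ((x : Nat) : Int))
      * pve field ((pvColsN field : Nat) : Int) (((y : Nat) : Int) + 1, ((x : Nat) : Int) + 1)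
    = pvG field y x * pvG field (y + 1) (x + 1)
  congr 1
  · rw [← pvCols_natCast]; exact pvG_eq_pve field hPre y x
  · rw [show (((y : Nat) : Int) + 1, ((x : Nat) : Int) + 1)
        = ((((y + 1 : Nat)) : Int), (((x + 1 : Nat)) : Int)) from by push_cast; simp]
    rw [← pvCols_natCast]; exact pvG_eq_pve field hPre (y + 1) (x + 1)

lemma SL1m1 (field : List (List Int)) (hPre : Pre_get_heuristic_score field) :
    pvSL field (pvCols field) (1, -1)
      = pvS2 field.length (pvColsN field) (fun y x => pvG field y (x + 1) * pvG field (y + 1) x) := by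
  rw [pvCols_natCast, pvSL_nat]
  unfold pvS2
  refine congrArg List.sum (List.map_congr_left ?_)
  intro y _
  refine pv_sum_range_shift (pvColsN field) _ _ ?_ ?_ ?_
  · show pve field ((pvColsN field : Nat) : Int) (((y : Nat) : Int), (((0 : Nat)) : Int))
        * pve field ((pvColsN field : Nat) : Int) (((y : Nat) : Int) + 1, (((0 : Nat)) : Int) + -1)
      = 0
    rw [show ((((0 : Nat)) : Int) + -1) = (-1 : Int) from by simp]
    rw [pve_neg_x field ((pvColsN field : Nat) : Int) (((y : Nat) : Int) + 1) (-1) (by norm_num),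
      mul_zero]
  · intro x
    show pve field ((pvColsN field : Nat) : Int) (((y : Nat) : Int), (((x + 1 : Nat)) : Int))
        * pve field ((pvColsN field : Nat) : Int) (((y : Nat) : Int) + 1, (((x + 1 : Nat)) : Int) + -1)
      = pvG field y (x + 1) * pvG field (y + 1) x
    congr 1
    · rw [← pvCols_natCast]; exact pvG_eq_pve field hPre y (x + 1)
    · rw [show (((y : Nat) : Int) + 1, (((x + 1 : Nat)) : Int) + -1)
          = ((((y + 1 : Nat)) : Int), ((x : Nat) : Int)) from by push_cast; simp]
      rw [← pvCols_natCast]; exact pvG_eq_pve field hPre (y + 1) x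
  · intro k hk
    show pvG field y (k + 1) * pvG field (y + 1) k = 0
    rw [hk, pvG_col_zero field y (pvColsN field) (le_refl _), zero_mul]

lemma NLG (field : List (List Int)) (hPre : Pre_get_heuristic_score field) :
    pvNL field (pvCols field)
      = pvS2 field.length (pvColsN field) (fun y x => pvG field y x) := by
  rw [pvCols_natCast, pvNL_nat]
  unfold pvS2
  refine congrArg List.sum (List.map_congr_left ?_)
  intro y _
  refine congrArg List.sum (List.map_congr_left ?_)
  intro x _
  show pve field ((pvColsN field : Nat) : Int) (((y : Nat) : Int), ((x : Nat) : Int))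
    = pvG field y x
  rw [← pvCols_natCast]
  exact pvG_eq_pve field hPre y x

-- ===== VERDICT (by name: the statement is the Claim_ definition above) =====
theorem get_heuristic_score_spec : Claim_equal_get_heuristic_score := by
  intro field _ hPre
  unfold Spec_get_heuristic_score
  rw [A_eq, B_eq]
  rw [pvSL_symm field _ (-1, 0), pvSL_symm field _ (-1, -1), pvSL_symm field _ (-1, 1),
      pvSL_symm field _ (0, -1)]
  norm_num
  rw [SL01 field hPre, SL10 field hPre, SL11 field hPre, SL1m1 field hPre, NLG field hPre]
  ring
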